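-- pv_equiv track=rewrite | github.com/tony13382/Personal-OfficialWeb | app/elements.py | string_formator
-- ===== SOURCE A (Python) =====
-- def string_formator(text: str):
--     # return text
--     parts = text.split("`")
--     result = ""
--     for i, part in enumerate(parts):
--         if i % 2 == 0:
--             result += part
--         else:
--             result += f'<span class="text-highlight">{part}</span>'
--     # 如果原本字串最後是 ` 結尾，會多一個空的 part，這邊不用特別處理
--     return result
-- ===== SOURCE B (Python) =====
-- def string_formator(text: str):
--     out = []
--     inside = False
--     for ch in text:
--         if ch == "`":
--             out.append("</span>" if inside else '<span class="text-highlight">')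
--             inside = not inside
--         else:
--             out.append(ch)
--     if inside:
--         out.append("</span>")
--     return "".join(out)
-- ===== Notes on version B (the rewrite author's own statement) =====
-- stated objective: alternative
-- what changed: Replaced the split-on-backtick-then-wrap-odd-indexed-parts pass with a single character-by-character state machine that toggles a boolean flag on each backtick and closes the open span at end of input.
import Mathlib
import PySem

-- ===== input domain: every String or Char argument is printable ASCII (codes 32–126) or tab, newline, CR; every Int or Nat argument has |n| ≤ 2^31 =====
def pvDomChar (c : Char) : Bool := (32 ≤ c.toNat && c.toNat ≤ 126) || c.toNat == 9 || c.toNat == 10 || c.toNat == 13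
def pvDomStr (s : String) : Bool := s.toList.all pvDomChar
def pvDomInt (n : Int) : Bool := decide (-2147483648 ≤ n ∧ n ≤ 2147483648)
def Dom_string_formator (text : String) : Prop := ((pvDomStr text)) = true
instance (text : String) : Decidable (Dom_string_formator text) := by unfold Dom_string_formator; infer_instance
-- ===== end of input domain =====

-- B replaces A's split-then-wrap-odd-parts pass by a single-pass toggle state machine; alternative decomposition, same cost.

-- ===== PORT A =====
def pvOpenTag : List Char := "<span class=\"text-highlight\">".toList
def pvCloseTag : List Char := "</span>".toList

def string_formator (text : String) : String :=
  String.mk ((PySem.List.enumerate (PySem.Chars.splitOn text.toList "`".toList) 0).foldl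
    (fun result ip =>
      if ip.1 % 2 == 0 then result ++ ip.2
      else result ++ pvOpenTag ++ ip.2 ++ pvCloseTag) [])

-- ===== PORT B =====
def pvStepB (s : Bool × List Char) (c : Char) : Bool × List Char :=
  if c = '`' then
    (!s.1, s.2 ++ (if s.1 then pvCloseTag else pvOpenTag))
  else (s.1, s.2 ++ [c])

def string_formator_alt (text : String) : String :=
  String.mk ((fun st => if st.1 then st.2 ++ pvCloseTag else st.2)
    (text.toList.foldl pvStepB (false, [])))

-- ===== PRECONDITION & SPEC =====
def Spec_string_formator (text : String) (out : String) : Prop := out = string_formator_alt text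
instance (text : String) (out : String) : Decidable (Spec_string_formator text out) := by unfold Spec_string_formator; infer_instance

-- ===== CLAIM (what is proved, stated in full; the proofs are below) =====
def Claim_equal_string_formator : Prop := ∀ (text : String), Dom_string_formator text → Spec_string_formator text (string_formator text)

-- ===== LEMMAS AND PROOFS =====

-- structural single-character split (proved equal to PySem.Chars.splitOn · ['`'])
def pvSC (pre : List Char) : List Char → List (List Char)
  | [] => [pre]
  | c :: rest => if c = '`' then pre :: pvSC [] rest else pvSC (pre ++ [c]) rest

-- the common "rest of the output" function both ports are reduced to
def pvG (inside : Bool) : List Char → List Char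
  | [] => if inside then pvCloseTag else []
  | c :: rest =>
    if c = '`' then (if inside then pvCloseTag ++ pvG false rest else pvOpenTag ++ pvG true rest)
    else c :: pvG inside rest

lemma go_eq_sc : ∀ (l : List Char) (fuel : Nat), l.length < fuel → ∀ (cur : List Char) (acc : List (List Char)),
    PySem.Chars.splitOn.go "`".toList fuel l cur acc = acc.reverse ++ pvSC cur.reverse l := by
  intro l
  induction l with
  | nil =>
    intro fuel h cur acc
    match fuel, h with
    | fuel + 1, _ => simp [PySem.Chars.splitOn.go, pvSC]
  | cons c rest ih =>
    intro fuel h cur acc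
    match fuel, h with
    | fuel + 1, h =>
      simp only [PySem.Chars.splitOn.go]
      by_cases hc : c = '`'
      · subst hc
        simp only [show ("`".toList.isPrefixOf ('`' :: rest)) = true by simp [List.isPrefixOf], if_pos]
        rw [show List.drop "`".toList.length ('`' :: rest) = rest from rfl]
        rw [ih fuel (by simpa using h)]
        simp [pvSC]
      · have hpre : ("`".toList.isPrefixOf (c :: rest)) = false := by
          simp [List.isPrefixOf]
          exact fun h' => hc h'.symm
        simp only [hpre, Bool.false_eq_true, if_neg, not_false_iff]
        rw [ih fuel (by simpa using h)]
        simp [pvSC, hc]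

lemma splitOn_eq_sc (l : List Char) : PySem.Chars.splitOn l "`".toList = pvSC [] l := by
  unfold PySem.Chars.splitOn
  rw [go_eq_sc l (l.length + 1) (by omega)]
  simp

-- A's enumerate-parity fold over pvSC, reduced to pvG (both parities at once)
lemma foldA_sc : ∀ (l pre acc : List Char) (k : Nat),
    ((PySem.List.enumerate (pvSC pre l) (k : Int)).foldl
      (fun result ip =>
        if ip.1 % 2 == 0 then result ++ ip.2
        else result ++ pvOpenTag ++ ip.2 ++ pvCloseTag) acc)
    = acc ++ (if k % 2 == 0 then pre ++ pvG false l else pvOpenTag ++ pre ++ pvG true l) := by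
  intro l
  induction l with
  | nil =>
    intro pre acc k
    simp only [pvSC, pvG, PySem.List.enumerate_cons, PySem.List.enumerate_nil, List.foldl]
    by_cases hk : k % 2 = 0
    · have h1 : ((k : Int) % 2 == 0) = true := by simp; omega
      simp [h1, hk]
    · have h1 : ((k : Int) % 2 == 0) = false := by simp; omega
      have h2 : (k % 2 == 0) = false := by simp; omega
      simp [h1, h2]
  | cons c rest ih =>
    intro pre acc k
    by_cases hc : c = '`'
    · subst hc
      rw [show pvSC pre ('`' :: rest) = pre :: pvSC [] rest from by simp [pvSC]]
      rw [PySem.List.enumerate_cons]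
      simp only [List.foldl]
      rw [show ((k : Int) + 1) = ((k + 1 : Nat) : Int) by push_cast; ring, ih]
      by_cases hk : k % 2 = 0
      · have h1 : ((k : Int) % 2 == 0) = true := by simp; omega
        have h2 : ((k + 1) % 2 == 0) = false := by simp; omega
        have h3 : (k % 2 == 0) = true := by simp [hk]
        simp [h1, h2, h3, pvG]
      · have h1 : ((k : Int) % 2 == 0) = false := by simp; omega
        have h2 : ((k + 1) % 2 == 0) = true := by simp; omega
        have h3 : (k % 2 == 0) = false := by simp; omega
        simp [h1, h2, h3, pvG]
    · simp only [pvSC, if_neg hc, pvG, ih]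
      by_cases hk : k % 2 = 0
      · have h3 : (k % 2 == 0) = true := by simp [hk]
        simp [h3]
      · have h3 : (k % 2 == 0) = false := by simp; omega
        simp [h3]

-- B's fold plus the final close, reduced to pvG
lemma foldB : ∀ (l : List Char) (b : Bool) (acc : List Char),
    (let st := l.foldl pvStepB (b, acc)
     if st.1 then st.2 ++ pvCloseTag else st.2) = acc ++ pvG b l := by
  intro l
  induction l with
  | nil =>
    intro b acc
    cases b <;> simp [pvG]
  | cons c rest ih =>
    intro b acc
    simp only [List.foldl, pvStepB, pvG]
    by_cases hc : c = '`'
    · cases b <;> simp [hc, ih]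
    · cases b <;> simp [hc, ih]

-- ===== VERDICT (by name: the statement is the Claim_ definition above) =====
theorem string_formator_spec : Claim_equal_string_formator := by
  intro text _
  unfold Spec_string_formator string_formator string_formator_alt
  rw [splitOn_eq_sc]
  have hA := foldA_sc text.toList [] [] 0
  simp only [Nat.cast_zero] at hA
  have hb := foldB text.toList false []
  rw [hA]
  refine congrArg String.mk ?_
  simpa using hb.symm
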